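-- pv_equiv track=rewrite | github.com/quadram-institute-bioscience/qimu | qimu/utils/reads_paths.py | find_first_unique_parts
-- ===== SOURCE A (Python) =====
-- def find_first_unique_parts(sample_names: list[str], separator: str = "_") -> dict[str, str]:
--     """Find the first unique part of each sample name.
--
--     Args:
--         sample_names: List of sample names
--         separator: Separator to use for splitting
--
--     Returns:
--         Dictionary mapping original name to unique part
--     """
--     if not sample_names:
--         return {}
--
--     # Split all names into parts
--     name_parts = {}
--     for name in sample_names:
--         parts = name.split(separator)
--         name_parts[name] = parts
--
--     # Find first position where names differ
--     result = {}
--     for name, parts in name_parts.items():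
--         # Try each part until we find one that's unique
--         for i, part in enumerate(parts):
--             # Check if this part is unique among all samples
--             unique = True
--             for other_name, other_parts in name_parts.items():
--                 if other_name == name:
--                     continue
--                 # If other sample has same part at same position, not unique
--                 if i < len(other_parts) and other_parts[i] == part:
--                     unique = False
--                     break
--
--             if unique:
--                 result[name] = part
--                 break
--         else:
--             # If no unique part found, use entire name
--             result[name] = name
--
--     return result
-- ===== SOURCE B (Python) =====
-- def find_first_unique_parts(sample_names: list[str], separator: str = "_") -> dict[str, str]:
--     """Map each sample name to its first positional-unique part (O(N*P) via one counting pass)."""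
--     if not sample_names:
--         return {}
--     names = list(dict.fromkeys(sample_names))
--     parts_list = [name.split(separator) for name in names]
--     # One pass: count, per (position, part), how many samples carry that part there.
--     counts = {}
--     for parts in parts_list:
--         for i, part in enumerate(parts):
--             counts[(i, part)] = counts.get((i, part), 0) + 1
--     result = {}
--     for name, parts in zip(names, parts_list):
--         for i, part in enumerate(parts):
--             if counts[(i, part)] == 1:
--                 result[name] = part
--                 break
--         else:
--             result[name] = name
--     return result
-- ===== Notes on version B (the rewrite author's own statement) =====
-- stated objective: faster
-- what changed: A decides uniqueness of each part by rescanning every other sample for every position of every name (O(N^2*P)); B makes one counting pass building a dict keyed by (position, part) and then picks, per name, the first part whose count is 1 (O(N*P)).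
import Mathlib
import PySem

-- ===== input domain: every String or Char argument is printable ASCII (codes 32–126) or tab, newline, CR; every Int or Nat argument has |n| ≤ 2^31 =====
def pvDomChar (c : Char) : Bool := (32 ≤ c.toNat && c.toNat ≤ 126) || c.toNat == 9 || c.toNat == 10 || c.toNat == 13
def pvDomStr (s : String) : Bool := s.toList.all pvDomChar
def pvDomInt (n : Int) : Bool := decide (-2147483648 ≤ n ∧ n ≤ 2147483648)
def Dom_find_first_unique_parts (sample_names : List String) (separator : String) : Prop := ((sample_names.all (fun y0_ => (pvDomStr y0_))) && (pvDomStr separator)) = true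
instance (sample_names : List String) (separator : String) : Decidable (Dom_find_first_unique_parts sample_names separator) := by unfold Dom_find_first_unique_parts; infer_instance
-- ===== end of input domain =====

-- B replaces A's quadratic per-name scan over all other samples by one counting pass
-- (a dict keyed by (position, part)); each name then takes its first part with count 1.


-- ===== PORT A =====
-- name.split(separator); Pre_ excludes separator = "", where Python raises ValueError, so .getD [] never fires
def pySplitFF (s sep : String) : List String := (PySem.Str.split? s sep).getD []

-- inner 'for other_name, other_parts in name_parts.items():' loop (continue/break only shape the flag, the foldl computes the same flag)
def ffupUnique (items : List (String × List String)) (name : String) (i : Int) (part : String) : Bool :=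
  items.foldl (fun unique op =>
    if op.1 == name then unique
    else if decide (i < (op.2.length : Int)) && (PySem.List.pyGetD op.2 i "" == part) then false
    else unique) true

-- 'for i, part in enumerate(parts): … break / else:' — first unique part, none if the else-branch runs
def ffupFind (items : List (String × List String)) (name : String) : List (Int × String) → Option String
  | [] => none
  | (i, part) :: rest =>
      if ffupUnique items name i part then some part else ffupFind items name rest

def find_first_unique_parts (sample_names : List String) (separator : String) : List (String × String) :=
  if sample_names = [] then []
  else
    let name_parts : PySem.Dict String (List String) :=
      sample_names.foldl (fun d name => d.insert name (pySplitFF name separator)) PySem.Dict.empty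
    let result : PySem.Dict String String :=
      name_parts.items.foldl (fun r np =>
        r.insert np.1 ((ffupFind name_parts.items np.1 (PySem.List.enumerate np.2 0)).getD np.1)) PySem.Dict.empty
    result.items

-- ===== PORT B =====
-- 'for i, part in enumerate(parts): if counts[(i,part)] == 1: … break / else:' — the key is always present
-- (it was counted from these very parts), so the lookup is getD 0
def altFind (counts : PySem.Dict (Int × String) Int) : List (Int × String) → Option String
  | [] => none
  | ip :: rest => if counts.getD ip 0 == 1 then some ip.2 else altFind counts rest

def find_first_unique_parts_alt (sample_names : List String) (separator : String) : List (String × String) :=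
  if sample_names = [] then []
  else
    let names := PySem.List.dedup sample_names
    let parts_list := names.map (fun n => pySplitFF n separator)
    let counts : PySem.Dict (Int × String) Int :=
      parts_list.foldl (fun c parts =>
        (PySem.List.enumerate parts 0).foldl (fun c ip => c.insert ip (c.getD ip 0 + 1)) c) PySem.Dict.empty
    let result : PySem.Dict String String :=
      (names.zip parts_list).foldl (fun r np =>
        r.insert np.1 ((altFind counts (PySem.List.enumerate np.2 0)).getD np.1)) PySem.Dict.empty
    result.items

-- ===== PRECONDITION & SPEC =====
-- Pre_ excludes only the inputs where Python raises: separator = "" makes str.split raise ValueError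
-- (in A and in B alike) unless sample_names is empty, where both return {} before splitting anything
def Pre_find_first_unique_parts (sample_names : List String) (separator : String) : Prop := sample_names = [] ∨ separator ≠ ""
instance (sample_names : List String) (separator : String) : Decidable (Pre_find_first_unique_parts sample_names separator) := by unfold Pre_find_first_unique_parts; infer_instance
def pvWitness_find_first_unique_parts : List String × String := (["s1_a_x", "s2_a_x", "s2_b"], "_")

def Spec_find_first_unique_parts (sample_names : List String) (separator : String) (out : List (String × String)) : Prop := out = find_first_unique_parts_alt sample_names separator
instance (sample_names : List String) (separator : String) (out : List (String × String)) : Decidable (Spec_find_first_unique_parts sample_names separator out) := by unfold Spec_find_first_unique_parts; infer_instance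

-- ===== CLAIM (what is proved, stated in full; the proofs are below) =====
def Claim_equal_find_first_unique_parts : Prop := ∀ (sample_names : List String) (separator : String), Dom_find_first_unique_parts sample_names separator → Pre_find_first_unique_parts sample_names separator → Spec_find_first_unique_parts sample_names separator (find_first_unique_parts sample_names separator)


-- ===== LEMMAS AND PROOFS =====

-- the name_parts dict: the value stored at a key is a function of the key alone, so rebuilds overwrite equal values
theorem ffup_getD_fold_insert (f : String → List String) (l : List String)
    (d : PySem.Dict String (List String)) (k : String) :
    (l.foldl (fun d n => d.insert n (f n)) d).getD k [] =
      if k ∈ l then f k else d.getD k [] := by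
  induction l generalizing d with
  | nil => simp
  | cons n t ih =>
    simp only [List.foldl_cons, ih, List.mem_cons]
    by_cases hk : k ∈ t
    · simp [hk]
    · by_cases he : k = n
      · simp [he, PySem.Dict.getD_insert_self]
      · simp [hk, he, PySem.Dict.getD_insert]

theorem ffup_name_parts_items (f : String → List String) (l : List String) :
    (l.foldl (fun d n => d.insert n (f n)) PySem.Dict.empty).items =
      (PySem.List.dedup l).map (fun n => (n, f n)) := by
  have hnd : (l.foldl (fun d n => d.insert n (f n)) PySem.Dict.empty).keys.Nodup :=
    PySem.Dict.nodup_keys_foldl_insert l _ PySem.Dict.empty PySem.Dict.nodup_keys_empty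
  have hkeys : (l.foldl (fun d n => d.insert n (f n)) PySem.Dict.empty).keys = PySem.List.dedup l := by
    rw [PySem.Dict.keys_foldl_insert]
    simp [PySem.Dict.keys_empty, PySem.Set.update, PySem.List.dedup_eq_ofList, PySem.Set.ofList_eq_foldl]
  rw [PySem.Dict.items_eq_map_keys _ hnd [], hkeys]
  apply List.map_congr_left
  intro k hk
  rw [ffup_getD_fold_insert, if_pos ((PySem.List.mem_dedup l k).mp hk)]

-- the counting dict counts occurrences of (position, part) across all enumerated parts lists
theorem ffup_counts_getD (pl : List (List String)) (d : PySem.Dict (Int × String) Int)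
    (key : Int × String) :
    (pl.foldl (fun c parts =>
        (PySem.List.enumerate parts 0).foldl (fun c ip => c.insert ip (c.getD ip 0 + 1)) c) d).getD key 0
      = d.getD key 0 + ((pl.flatMap (fun ps => PySem.List.enumerate ps 0)).count key : Int) := by
  induction pl generalizing d with
  | nil => simp
  | cons ps t ih =>
    simp only [List.foldl_cons, ih, List.flatMap_cons, List.count_append,
      PySem.Dict.getD_foldl_insert_add_one]
    push_cast
    ring

theorem ffup_enumerate_nodup (ps : List String) (s : Int) : (PySem.List.enumerate ps s).Nodup := by
  have h := PySem.List.pairwise_lt_enumerate ps s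
  exact h.imp (fun hlt => by intro he; rw [he] at hlt; omega)

theorem ffup_count_enumerate (ps : List String) (key : Int × String) :
    (PySem.List.enumerate ps 0).count key = if key ∈ PySem.List.enumerate ps 0 then 1 else 0 := by
  split_ifs with h
  · exact List.count_eq_one_of_mem (ffup_enumerate_nodup ps 0) h
  · exact List.count_eq_zero_of_not_mem h

theorem ffup_count_flatMap (f : String → List String) (names : List String) (key : Int × String) :
    ((names.map f).flatMap (fun ps => PySem.List.enumerate ps 0)).count key =
      names.countP (fun n => decide (key ∈ PySem.List.enumerate (f n) 0)) := by
  induction names with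
  | nil => simp
  | cons n t ih =>
    simp only [List.map_cons, List.flatMap_cons, List.count_append, ih, List.countP_cons,
      ffup_count_enumerate]
    by_cases h : key ∈ PySem.List.enumerate (f n) 0 <;> simp [h]; omega

-- on a duplicate-free list containing a witness of g, "countP g = 1" says "no second witness"
theorem ffup_countP_eq_one_iff {α : Type} (l : List α) (hnd : l.Nodup) (a : α) (ha : a ∈ l)
    (g : α → Bool) (hga : g a = true) :
    l.countP g = 1 ↔ ∀ b ∈ l, b ≠ a → g b = false := by
  induction l with
  | nil => cases ha
  | cons x t ih =>
    rw [List.nodup_cons] at hnd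
    rcases List.mem_cons.mp ha with hax | hat
    · subst hax
      simp only [List.countP_cons, hga, if_true, List.mem_cons]
      constructor
      · intro h1 b hb hbne
        rcases hb with rfl | hbt
        · exact absurd rfl hbne
        · have h0 : t.countP g = 0 := by omega
          have := List.countP_eq_zero.mp h0 b hbt
          simpa using this
      · intro h
        have h0 : t.countP g = 0 := List.countP_eq_zero.mpr (fun b hb => by
          have hbx : b ≠ a := fun e => hnd.1 (e ▸ hb)
          simp [h b (Or.inr hb) hbx])
        omega
    · have hxa : x ≠ a := fun e => hnd.1 (e ▸ hat)
      by_cases hgx : g x = true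
      · have hpos : 0 < t.countP g := List.countP_pos_iff.mpr ⟨a, hat, hga⟩
        simp only [List.countP_cons, hgx, if_true]
        constructor
        · intro h1; omega
        · intro h
          exact absurd (h x (List.mem_cons.mpr (Or.inl rfl)) hxa) (by simp [hgx])
      · have hgx' : g x = false := by simpa using hgx
        simp only [List.countP_cons, hgx', Bool.false_eq_true, if_false, Nat.add_zero, List.mem_cons]
        rw [ih hnd.2 hat]
        constructor
        · intro h b hb hbne
          rcases hb with rfl | hbt
          · exact hgx'
          · exact h b hbt hbne
        · intro h b hb hbne
          exact h b (Or.inr hb) hbne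

-- A's per-other check is membership of (i, part) in the other's enumeration (i comes from an enumeration, so 0 ≤ i)
theorem ffup_check_eq_mem (i : Int) (p : String) (ps : List String) (hi : 0 ≤ i) :
    (decide (i < (ps.length : Int)) && (PySem.List.pyGetD ps i "" == p)) =
      decide ((i, p) ∈ PySem.List.enumerate ps 0) := by
  rw [Bool.eq_iff_iff]
  simp only [Bool.and_eq_true, decide_eq_true_eq, beq_iff_eq, PySem.List.mem_enumerate_iff]
  constructor
  · rintro ⟨hlt, hget⟩
    refine ⟨i.toNat, by omega, ?_⟩
    rw [PySem.List.pyGetD_eq_getElem ps "" hi hlt] at hget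
    rw [Prod.ext_iff]
    exact ⟨by simp; omega, hget.symm⟩
  · rintro ⟨k, hk, he⟩
    rw [Prod.ext_iff] at he
    obtain ⟨hik, hpk⟩ := he
    simp only [zero_add] at hik
    have hlt : i < (ps.length : Int) := by omega
    refine ⟨hlt, ?_⟩
    rw [PySem.List.pyGetD_eq_getElem ps "" hi hlt]
    simp only [show i.toNat = k by omega]
    exact hpk.symm

-- the flag loop of ffupUnique is an 'any'
theorem ffup_unique_eq_any (items : List (String × List String)) (name : String) (i : Int) (p : String) :
    ffupUnique items name i p =
      !(items.any (fun op => !(op.1 == name) &&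
        (decide (i < (op.2.length : Int)) && (PySem.List.pyGetD op.2 i "" == p)))) := by
  unfold ffupUnique
  rw [PySem.List.foldl_congr_mem items _
    (fun u op => if (!(op.1 == name) &&
      (decide (i < (op.2.length : Int)) && (PySem.List.pyGetD op.2 i "" == p))) then false else u) true ?_]
  · rw [PySem.List.foldl_if_false_eq]
    simp
  · intro acc op _
    by_cases h1 : op.1 == name
    · simp [h1]
    · simp only [h1, Bool.not_false, Bool.true_and]
      rfl

-- the crux: "no other sample has this part at this position" ⟺ "this (position, part) occurs exactly once overall"
theorem ffup_unique_iff_count_one (f : String → List String) (names : List String)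
    (hnd : names.Nodup) (name : String) (hmem : name ∈ names) (i : Int) (p : String)
    (hi : 0 ≤ i) (hself : (i, p) ∈ PySem.List.enumerate (f name) 0) :
    (ffupUnique (names.map (fun n => (n, f n))) name i p = true ↔
      names.countP (fun n => decide ((i, p) ∈ PySem.List.enumerate (f n) 0)) = 1) := by
  rw [ffup_unique_eq_any, List.any_map]
  have hcong : ∀ n ∈ names,
      ((fun op : String × List String => !(op.1 == name) &&
          (decide (i < (op.2.length : Int)) && (PySem.List.pyGetD op.2 i "" == p))) ∘
        (fun n => (n, f n))) n
      = (fun n => !(n == name) && decide ((i, p) ∈ PySem.List.enumerate (f n) 0)) n := by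
    intro n _
    simp only [Function.comp_apply]
    rw [ffup_check_eq_mem i p (f n) hi]
  rw [PySem.List.any_congr_mem hcong]
  rw [ffup_countP_eq_one_iff names hnd name hmem _ (by simpa using hself)]
  rw [Bool.not_eq_eq_eq_not, Bool.not_true, List.any_eq_false]
  constructor
  · intro h b hb hbne
    have := h b hb
    simp only [Bool.and_eq_true, Bool.not_eq_true', beq_eq_false_iff_ne, ne_eq,
      decide_eq_true_eq, not_and] at this
    by_cases hm : (i, p) ∈ PySem.List.enumerate (f b) 0
    · exact absurd hm (fun hm' => (this hbne) hm')
    · simpa using hm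
  · intro h b hb
    by_cases hbne : b = name
    · subst hbne; simp
    · have := h b hb hbne
      simp [this]

theorem ffup_find_eq_altFind (items : List (String × List String))
    (counts : PySem.Dict (Int × String) Int) (name : String) (l : List (Int × String))
    (h : ∀ ip ∈ l, (ffupUnique items name ip.1 ip.2 = true ↔ counts.getD ip 0 = 1)) :
    ffupFind items name l = altFind counts l := by
  induction l with
  | nil => rfl
  | cons ip rest ih =>
    obtain ⟨i, part⟩ := ip
    have hb : ffupUnique items name i part = (counts.getD (i, part) 0 == 1) := by
      rw [Bool.eq_iff_iff, beq_iff_eq]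
      exact h (i, part) (List.mem_cons.mpr (Or.inl rfl))
    simp only [ffupFind, altFind]
    rw [hb]
    split_ifs with hc
    · rfl
    · exact ih (fun q hq => h q (List.mem_cons.mpr (Or.inr hq)))

theorem ffup_zip_self_map {α β : Type} (l : List α) (g : α → β) :
    l.zip (l.map g) = l.map (fun x => (x, g x)) := by
  induction l with
  | nil => rfl
  | cons x t ih => simpa using ih

-- ===== VERDICT (by name: the statement is the Claim_ definition above) =====
theorem find_first_unique_parts_spec : Claim_equal_find_first_unique_parts := by
  intro sample_names separator _ _
  unfold Spec_find_first_unique_parts find_first_unique_parts find_first_unique_parts_alt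
  by_cases hnil : sample_names = []
  · simp [hnil]
  · simp only [if_neg hnil]
    have hitems := ffup_name_parts_items (fun n => pySplitFF n separator) sample_names
    simp only at hitems
    rw [hitems, ffup_zip_self_map]
    congr 1
    apply PySem.List.foldl_congr_mem
    intro acc np hnp
    obtain ⟨n, hn, rfl⟩ := List.mem_map.mp hnp
    have hfind : ffupFind
        ((PySem.List.dedup sample_names).map (fun n => (n, pySplitFF n separator))) n
        (PySem.List.enumerate (pySplitFF n separator) 0)
        = altFind
            (((PySem.List.dedup sample_names).map (fun n => pySplitFF n separator)).foldl
              (fun c parts =>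
                (PySem.List.enumerate parts 0).foldl (fun c ip => c.insert ip (c.getD ip 0 + 1)) c)
              PySem.Dict.empty)
            (PySem.List.enumerate (pySplitFF n separator) 0) := by
      apply ffup_find_eq_altFind
      intro ip hip
      obtain ⟨i, part⟩ := ip
      have hi : 0 ≤ i := by
        obtain ⟨k, hk, he⟩ := (PySem.List.mem_enumerate_iff _ _ _).mp hip
        rw [Prod.ext_iff] at he
        omega
      rw [ffup_counts_getD, ffup_count_flatMap, PySem.Dict.getD_empty]
      rw [ffup_unique_iff_count_one (fun n => pySplitFF n separator) (PySem.List.dedup sample_names)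
        (PySem.List.nodup_dedup sample_names) n hn i part hi hip]
      omega
    rw [hfind]
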